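-- pv_equiv track=rewrite | github.com/mylesfabre/stop-eating-animals | hw3pr3.py | check
-- ===== SOURCE A (Python) =====
-- def check(playerList, string, wordList):
--     #h = len(playerList)
--     # #if (playerList[i] in string for i in range(h):
--     #     return True
--     # else:
--     #     return False
--     #TFList = map(in, playerList)
--     if playerList == []:
--         return True
--     elif playerList[0] in string and wordList:
--         '''r is the length of playerList plus the index of where it is in the string'''
--         r = len(playerList[0]) + string.find(playerList[0])
--         return check(playerList[1:],string[r:] , wordList)
--     else:
--         return False
-- ===== SOURCE B (Python) =====
-- def check(playerList, string, wordList):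
--     s = string
--     for name in playerList:
--         if not (name in s and wordList):
--             return False
--         s = s[len(name) + s.find(name):]
--     return True
-- ===== Notes on version B (the rewrite author's own statement) =====
-- stated objective: idiomatic
-- what changed: Replaces the tail recursion (which copies playerList[1:] at every step) by a single for-loop over playerList that keeps only the shrinking string as state and returns False early; no recursion and no list copies.
import Mathlib
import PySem

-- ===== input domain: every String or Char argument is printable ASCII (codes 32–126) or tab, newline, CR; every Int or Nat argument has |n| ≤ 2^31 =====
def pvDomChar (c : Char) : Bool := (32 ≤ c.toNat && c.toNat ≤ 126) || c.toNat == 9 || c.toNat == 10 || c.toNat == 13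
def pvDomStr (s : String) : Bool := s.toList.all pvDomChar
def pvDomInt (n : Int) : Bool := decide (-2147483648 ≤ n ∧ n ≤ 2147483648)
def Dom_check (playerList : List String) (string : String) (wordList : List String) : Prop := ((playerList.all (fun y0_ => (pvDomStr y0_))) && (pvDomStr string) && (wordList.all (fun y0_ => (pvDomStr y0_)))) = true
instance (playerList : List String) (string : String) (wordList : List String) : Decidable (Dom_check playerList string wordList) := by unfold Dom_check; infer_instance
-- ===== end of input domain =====

-- B replaces A's tail recursion by a single loop over playerList keeping only the
-- shrinking string as state (idiomatic; return value identical on all inputs).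

-- ===== PORT A =====
-- literal transliteration of A: recursion on playerList, slicing the string by
-- r = len(head) + string.find(head) at each step; guard 'head in string and wordList'.
def check (playerList : List String) (string : String) (wordList : List String) : Bool :=
  match playerList with
  | [] => true
  | p0 :: rest =>
    if PySem.Str.isIn p0 string && !wordList.isEmpty then
      let r : Int := (PySem.Str.len p0 : Int) + PySem.Str.find string p0
      check rest (PySem.Str.slice string (some r) none) wordList
    else
      false

-- ===== PORT B =====
-- B's loop with early return, as a foldl over playerList with Option String state
-- (none = already returned False); the result is whether the loop survived.
def check_alt (playerList : List String) (string : String) (wordList : List String) : Bool :=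
  (playerList.foldl
    (fun acc name =>
      match acc with
      | none => none
      | some s =>
        if PySem.Str.isIn name s && !wordList.isEmpty then
          some (PySem.Str.slice s (some ((PySem.Str.len name : Int) + PySem.Str.find s name)) none)
        else none)
    (some string)).isSome

-- ===== PRECONDITION & SPEC =====
def Spec_check (playerList : List String) (string : String) (wordList : List String) (out : Bool) : Prop := out = check_alt playerList string wordList
instance (playerList : List String) (string : String) (wordList : List String) (out : Bool) : Decidable (Spec_check playerList string wordList out) := by unfold Spec_check; infer_instance

-- ===== CLAIM (what is proved, stated in full; the proofs are below) =====
def Claim_equal_check : Prop := ∀ (playerList : List String) (string : String) (wordList : List String), Dom_check playerList string wordList → Spec_check playerList string wordList (check playerList string wordList)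

-- ===== LEMMAS AND PROOFS =====

theorem foldl_none (playerList : List String) (f : Option String → String → Option String)
    (hf : ∀ x, f none x = none) : playerList.foldl f none = none := by
  induction playerList with
  | nil => rfl
  | cons a l ih => simp [List.foldl, hf, ih]

theorem check_eq_alt (playerList : List String) (string : String) (wordList : List String) :
    check playerList string wordList = check_alt playerList string wordList := by
  induction playerList generalizing string with
  | nil => rfl
  | cons p0 rest ih =>
    unfold check check_alt
    by_cases h : (PySem.Str.isIn p0 string && !wordList.isEmpty) = true
    · simp only [h, if_pos, List.foldl]
      exact ih _
    · simp only [h, if_neg, List.foldl, Bool.false_eq_true, not_false_eq_true]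
      rw [foldl_none _ _ (fun x => rfl)]
      rfl

-- ===== VERDICT (by name: the statement is the Claim_ definition above) =====
theorem check_spec : Claim_equal_check := by
  intro playerList string wordList _
  unfold Spec_check
  exact check_eq_alt playerList string wordList
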